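-- pv_equiv track=rewrite | github.com/jayaprakash9603/MountBlue-Job-Challenge | BigSorting.py | bigSorting
-- ===== SOURCE A (Python) =====
-- from collections import defaultdict
--
-- def bigSorting(unsorted):
--     arr = []
--     d = defaultdict(list)
--     for x in unsorted:
--         d[len(x)].append(x)
--     for k, v in sorted(d.items(), key=lambda i: i[0]):
--         arr += sorted(v)
--     return arr
-- ===== SOURCE B (Python) =====
-- def bigSorting(unsorted):
--     return sorted(unsorted, key=lambda x: (len(x), x))
-- ===== Notes on version B (the rewrite author's own statement) =====
-- stated objective: simpler
-- what changed: Replaces the length-keyed defaultdict bucketing (build groups, sort the keys, sort each bucket, concatenate) with a single stable sort under the composite key (len(x), x).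
import Mathlib
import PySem

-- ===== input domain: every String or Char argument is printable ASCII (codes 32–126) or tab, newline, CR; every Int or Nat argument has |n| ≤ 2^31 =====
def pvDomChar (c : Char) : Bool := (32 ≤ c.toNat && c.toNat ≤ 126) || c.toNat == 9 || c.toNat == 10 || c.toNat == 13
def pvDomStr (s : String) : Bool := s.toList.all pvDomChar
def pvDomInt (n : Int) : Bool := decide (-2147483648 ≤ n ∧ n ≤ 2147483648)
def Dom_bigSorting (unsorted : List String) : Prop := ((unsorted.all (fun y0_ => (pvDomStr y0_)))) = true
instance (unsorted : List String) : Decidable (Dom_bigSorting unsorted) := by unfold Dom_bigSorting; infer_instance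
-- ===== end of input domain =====

-- B replaces A's length-keyed dict of buckets (sort the keys, sort each bucket, concatenate)
-- with a single stable sort under the composite key (len(x), x); same cost, simpler.

-- ===== PORT A =====
def bigSorting (unsorted : List String) : List String :=
  -- arr = []; d = defaultdict(list); for x in unsorted: d[len(x)].append(x)
  let d : PySem.Dict Int (List String) :=
    unsorted.foldl (fun d x => d.modify ((x.length : Int)) [] (fun v => v ++ [x])) PySem.Dict.empty
  -- for k, v in sorted(d.items(), key=lambda i: i[0]): arr += sorted(v)
  (PySem.List.sorted d.items (fun i => i.1)).foldl
    (fun arr kv => arr ++ PySem.List.sorted kv.2 (fun x => x)) []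

-- ===== PORT B =====
def bigSorting_alt (unsorted : List String) : List String :=
  -- return sorted(unsorted, key=lambda x: (len(x), x))
  PySem.List.sorted2 unsorted (fun x => (x.length : Int)) (fun x => x)

-- ===== PRECONDITION & SPEC =====
def Spec_bigSorting (unsorted : List String) (out : List String) : Prop := out = bigSorting_alt unsorted
instance (unsorted : List String) (out : List String) : Decidable (Spec_bigSorting unsorted out) := by unfold Spec_bigSorting; infer_instance

-- ===== CLAIM (what is proved, stated in full; the proofs are below) =====
def Claim_equal_bigSorting : Prop := ∀ (unsorted : List String), Dom_bigSorting unsorted → Spec_bigSorting unsorted (bigSorting unsorted)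

-- ===== LEMMAS AND PROOFS =====

-- the composite key (len x, x), lexicographically ordered
def pvKey (x : String) : Lex (Int × String) := toLex ((x.length : Int), x)

theorem pvKey_injective : Function.Injective pvKey := by
  intro a b h
  have := congrArg (fun p => (ofLex p).2) h
  simpa [pvKey] using this

-- B's sorted2 is 'sorted' under the lex composite key
theorem alt_eq_sorted (xs : List String) :
    bigSorting_alt xs = PySem.List.sorted xs pvKey := by
  unfold bigSorting_alt PySem.List.sorted2 PySem.List.sorted
  have hfun : (fun a b : String =>
        decide ((a.length : Int) < (b.length : Int)) ||
          (!decide ((b.length : Int) < (a.length : Int)) && decide (a < b)))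
      = (fun a b : String => decide (pvKey a < pvKey b)) := by
    funext a b
    rw [Bool.eq_iff_iff]
    simp only [Bool.or_eq_true, Bool.and_eq_true, Bool.not_eq_eq_eq_not, Bool.not_true,
      decide_eq_true_iff, decide_eq_false_iff_not, pvKey, Prod.Lex.lt_iff, ofLex_toLex]
    constructor
    · rintro (h | ⟨h1, h2⟩)
      · exact Or.inl h
      · rcases lt_trichotomy ((a.length : Int)) ((b.length : Int)) with h' | h' | h'
        · exact Or.inl h'
        · exact Or.inr ⟨h', h2⟩
        · exact absurd h' h1
    · rintro (h | ⟨h1, h2⟩)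
      · exact Or.inl h
      · exact Or.inr ⟨by omega, h2⟩
  simp only [Bool.false_eq_true, if_false, hfun]

-- d.getD k [] after the grouping loop = the filter of the traversed list by length k
theorem getD_group (l : List String) (d : PySem.Dict Int (List String)) (k : Int) :
    (l.foldl (fun d x => d.modify ((x.length : Int)) [] (fun v => v ++ [x])) d).getD k []
      = d.getD k [] ++ l.filter (fun x => (x.length : Int) == k) := by
  induction l generalizing d with
  | nil => simp
  | cons x t ih =>
    simp only [List.foldl_cons, List.filter_cons, ih, PySem.Dict.getD_modify]
    by_cases h : k = (x.length : Int)
    · simp [h]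
    · have h' : ¬ ((x.length : Int) == k) = true := by simpa [beq_iff_eq] using fun e => h e.symm
      simp [h, h']

-- concatenating, over a list of distinct keys covering every length, the filters by length is a permutation
theorem flat_filter_perm (ks : List Int) (l : List String)
    (hnd : ks.Nodup) (hcov : ∀ x ∈ l, (x.length : Int) ∈ ks) :
    (ks.flatMap (fun k => l.filter (fun x => (x.length : Int) == k))).Perm l := by
  induction ks generalizing l with
  | nil =>
    have : l = [] := by
      cases l with
      | nil => rfl
      | cons y t => exact absurd (hcov y (by simp)) (by simp)
    simp [this]
  | cons k ks ih =>
    rcases List.nodup_cons.mp hnd with ⟨hk, hnd'⟩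
    set l' := l.filter (fun x => !((x.length : Int) == k)) with hl'
    have hcong : ∀ k' ∈ ks,
        l.filter (fun x => (x.length : Int) == k') = l'.filter (fun x => (x.length : Int) == k') := by
      intro k' hk'
      rw [hl', List.filter_filter]
      apply List.filter_congr
      intro y _
      by_cases h : (y.length : Int) = k'
      · have hkk : ¬ k' = k := by rintro rfl; exact hk hk'
        simp [h, hkk]
      · simp [h]
    have hcov' : ∀ x ∈ l', (x.length : Int) ∈ ks := by
      intro x hx
      rw [hl', List.mem_filter] at hx
      rcases List.mem_cons.mp (hcov x hx.1) with h | h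
      · exact absurd h (by simpa using hx.2)
      · exact h
    have hstep : (k :: ks).flatMap (fun k => l.filter (fun x => (x.length : Int) == k))
        = l.filter (fun x => (x.length : Int) == k)
            ++ ks.flatMap (fun k => l'.filter (fun x => (x.length : Int) == k)) := by
      rw [List.flatMap_cons]
      congr 1
      exact List.flatMap_congr hcong
    rw [hstep]
    exact ((List.Perm.append_left _ (ih l' hnd' hcov')).trans (List.filter_append_perm _ l))

-- the concatenated per-bucket sorts are pairwise nondecreasing under the composite key
theorem flat_pairwise (ps : List (Int × List String)) (l : List String)
    (hps : ps.Pairwise (fun p q => p.1 < q.1))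
    (hchunk : ∀ p ∈ ps, p.2 = l.filter (fun x => (x.length : Int) == p.1)) :
    (ps.flatMap (fun p => PySem.List.sorted p.2 (fun x => x))).Pairwise
      (fun a b => pvKey a ≤ pvKey b) := by
  induction ps with
  | nil => simp
  | cons p ps ih =>
    rcases List.pairwise_cons.mp hps with ⟨hhead, htail⟩
    have hchp := hchunk p (by simp)
    have hlen : ∀ x ∈ PySem.List.sorted p.2 (fun x => x), (x.length : Int) = p.1 := by
      intro x hx
      have hx' : x ∈ p.2 := (PySem.List.mem_sorted _ _ _ _).mp hx
      rw [hchp] at hx'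
      simpa [beq_iff_eq] using (List.mem_filter.mp hx').2
    rw [List.flatMap_cons, List.pairwise_append]
    refine ⟨?_, ih htail (fun q hq => hchunk q (by simp [hq])), ?_⟩
    · -- within the bucket: equal lengths, strings nondecreasing
      have hsort := PySem.List.sorted_pairwise p.2 (fun x => x)
      refine List.Pairwise.imp_of_mem ?_ hsort
      intro a b ha hb hab
      rw [pvKey, pvKey, Prod.Lex.le_iff]
      refine Or.inr ⟨?_, ?_⟩ <;> simp [ofLex_toLex, hlen a ha, hlen b hb, hab]
    · -- across buckets: strictly larger keys, hence strictly larger lengths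
      intro a ha b hb
      have hla := hlen a ha
      rcases List.mem_flatMap.mp hb with ⟨q, hq, hbq⟩
      have hbq' : b ∈ q.2 := (PySem.List.mem_sorted _ _ _ _).mp hbq
      rw [hchunk q (by simp [hq])] at hbq'
      have hlb : (b.length : Int) = q.1 := by
        simpa [beq_iff_eq] using (List.mem_filter.mp hbq').2
      rw [pvKey, pvKey, Prod.Lex.le_iff]
      exact Or.inl (by rw [hla, hlb]; exact hhead q hq)

-- A's intermediate dict and its sorted item list (proof-side names for A's locals)
def pvD (unsorted : List String) : PySem.Dict Int (List String) :=
  unsorted.foldl (fun d x => d.modify ((x.length : Int)) [] (fun v => v ++ [x])) PySem.Dict.empty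

def pvPS (unsorted : List String) : List (Int × List String) :=
  PySem.List.sorted (pvD unsorted).items (fun i => i.1)

theorem bigSorting_eq_flatMap (unsorted : List String) :
    bigSorting unsorted = (pvPS unsorted).flatMap (fun p => PySem.List.sorted p.2 (fun x => x)) := by
  show ((pvPS unsorted).foldl (fun arr kv => arr ++ PySem.List.sorted kv.2 (fun x => x)) []) = _
  rw [PySem.List.foldl_append_eq_flatMap]
  rfl

-- ===== VERDICT (by name: the statement is the Claim_ definition above) =====
theorem bigSorting_spec : Claim_equal_bigSorting := by
  intro unsorted _
  unfold Spec_bigSorting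
  rw [alt_eq_sorted, bigSorting_eq_flatMap]
  -- keys of the dict are the distinct lengths, nodup
  have hknd : (pvD unsorted).keys.Nodup := by
    unfold pvD
    exact PySem.Dict.nodup_keys_foldl_modify_key _ _ _ _ _ (by simp)
  have hkeys : (pvD unsorted).keys = PySem.Set.update [] (unsorted.map (fun x => (x.length : Int))) := by
    unfold pvD
    simpa using PySem.Dict.keys_foldl_modify_key unsorted (fun x => (x.length : Int)) []
      (fun d x v => v ++ [x]) PySem.Dict.empty
  -- chunks of the sorted item list are the filters of unsorted by length
  have hchunk : ∀ p ∈ pvPS unsorted, p.2 = unsorted.filter (fun x => (x.length : Int) == p.1) := by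
    intro p hp
    have hpit : (p.1, p.2) ∈ (pvD unsorted).items := (PySem.List.mem_sorted _ _ _ _).mp hp
    have hget : (pvD unsorted).get? p.1 = some p.2 :=
      PySem.Dict.get?_of_mem_items (pvD unsorted) hpit hknd
    have hgd : (pvD unsorted).getD p.1 [] = p.2 := by simp [PySem.Dict.getD, hget]
    rw [← hgd]
    unfold pvD
    rw [getD_group]
    simp
  -- fst-values of the sorted item list are strictly increasing
  have hkm : ((pvPS unsorted).map (·.1)).Perm (pvD unsorted).keys := by
    have h : (pvPS unsorted).Perm (pvD unsorted).items := PySem.List.sorted_perm _ _ _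
    simpa [PySem.Dict.keys] using h.map (·.1)
  have hndps : ((pvPS unsorted).map (·.1)).Nodup := hkm.nodup_iff.mpr hknd
  have hle : (pvPS unsorted).Pairwise (fun p q => p.1 ≤ q.1) :=
    PySem.List.sorted_pairwise (pvD unsorted).items (fun i => i.1)
  have hne : (pvPS unsorted).Pairwise (fun p q => p.1 ≠ q.1) := List.pairwise_map.mp hndps
  have hlt : (pvPS unsorted).Pairwise (fun p q => p.1 < q.1) := by
    refine (hle.and hne).imp ?_
    rintro p q ⟨h1, h2⟩
    exact lt_of_le_of_ne h1 h2
  -- permutation with unsorted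
  have hcov : ∀ x ∈ unsorted, (x.length : Int) ∈ (pvPS unsorted).map (·.1) := by
    intro x hx
    rw [hkm.mem_iff, hkeys, PySem.Set.mem_update]
    right
    exact List.mem_map.mpr ⟨x, hx, rfl⟩
  have hperm1 : ((pvPS unsorted).flatMap (fun p => PySem.List.sorted p.2 (fun x => x))).Perm
      ((pvPS unsorted).flatMap (·.2)) :=
    List.Perm.flatMap (List.Perm.refl _) (fun p _ => PySem.List.sorted_perm p.2 (fun x => x) false)
  have hperm2 : (pvPS unsorted).flatMap (·.2)
      = ((pvPS unsorted).map (·.1)).flatMap (fun k => unsorted.filter (fun x => (x.length : Int) == k)) := by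
    rw [List.flatMap_map]
    exact List.flatMap_congr (fun p hp => hchunk p hp)
  have hpermA : ((pvPS unsorted).flatMap (fun p => PySem.List.sorted p.2 (fun x => x))).Perm unsorted := by
    refine hperm1.trans ?_
    rw [hperm2]
    exact flat_filter_perm _ _ hndps hcov
  have hpermB : (PySem.List.sorted unsorted pvKey).Perm unsorted := PySem.List.sorted_perm _ _ _
  exact PySem.List.eq_of_perm_of_pairwise_le_of_injective pvKey pvKey_injective
    (hpermA.trans hpermB.symm)
    (flat_pairwise (pvPS unsorted) unsorted hlt hchunk)
    (PySem.List.sorted_pairwise unsorted pvKey)
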